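-- pv_equiv track=rewrite | github.com/sachin-kumar-2003/LeetCode_Contest | Weekly_contest/contest_484/A_residuePrefixes.py | residuePrefixes
-- ===== SOURCE A (Python) =====
-- def residuePrefixes(s: str) -> int:
--     uq = set()
--     ans = 0
--     pre = ""
--     for ch in s:
--         pre += ch
--         uq.add(ch)
--         if len(uq) == len(pre) % 3:
--             ans += 1
--     return ans
-- ===== SOURCE B (Python) =====
-- def residuePrefixes(s: str) -> int:
--     seen = set()
--     marks = []
--     for ch in s:
--         marks.append(0 if ch in seen else 1)
--         seen.add(ch)
--     distinct = []
--     total = 0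
--     for m in marks:
--         total += m
--         distinct.append(total)
--     return sum(1 for i, d in enumerate(distinct) if d == (i + 1) % 3)
-- ===== Notes on version B (the rewrite author's own statement) =====
-- stated objective: alternative
-- what changed: Single fold with a live set test per step is replaced by a two-phase table decomposition: a first-occurrence 0/1 mark list, cumulative sums giving per-prefix distinct counts, then an index/value tally with no set lookups.
import Mathlib
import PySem

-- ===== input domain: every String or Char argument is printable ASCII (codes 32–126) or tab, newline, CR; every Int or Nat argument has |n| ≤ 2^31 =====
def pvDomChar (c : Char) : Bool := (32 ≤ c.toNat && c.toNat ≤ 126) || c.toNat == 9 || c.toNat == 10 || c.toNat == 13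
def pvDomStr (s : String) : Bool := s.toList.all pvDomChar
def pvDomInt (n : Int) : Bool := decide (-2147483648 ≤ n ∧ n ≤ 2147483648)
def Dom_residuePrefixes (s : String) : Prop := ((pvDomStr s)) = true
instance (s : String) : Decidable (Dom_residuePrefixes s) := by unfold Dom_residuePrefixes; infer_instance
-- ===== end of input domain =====

-- B replaces A's single fold-with-set-test by a mark list + running-sum table and a tally pass (alternative decomposition, same cost).

-- ===== PORT A =====
def residuePrefixes (s : String) : Int :=
  (s.toList.foldl
    (fun (st : PySem.Set Char × Int × List Char) ch =>
      let pre := st.2.2 ++ [ch]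
      let uq := st.1.add ch
      let ans := if uq.length == pre.length % 3 then st.2.1 + 1 else st.2.1
      (uq, ans, pre))
    (PySem.Set.empty, 0, [])).2.1

-- ===== PORT B =====
def residuePrefixes_alt (s : String) : Int :=
  let marks := (s.toList.foldl
    (fun (st : PySem.Set Char × List Int) ch =>
      (st.1.add ch, st.2 ++ [if st.1.contains ch then (0 : Int) else 1]))
    (PySem.Set.empty, [])).2
  let distinct := (marks.foldl
    (fun (st : Int × List Int) m => (st.1 + m, st.2 ++ [st.1 + m]))
    ((0 : Int), [])).2
  (((PySem.List.enumerate distinct).filter (fun p => p.2 == (p.1 + 1) % 3)).length : Int)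

-- ===== PRECONDITION & SPEC =====
def Spec_residuePrefixes (s : String) (out : Int) : Prop := out = residuePrefixes_alt s
instance (s : String) (out : Int) : Decidable (Spec_residuePrefixes s out) := by unfold Spec_residuePrefixes; infer_instance

-- ===== CLAIM (what is proved, stated in full; the proofs are below) =====
def Claim_equal_residuePrefixes : Prop := ∀ (s : String), Dom_residuePrefixes s → Spec_residuePrefixes s (residuePrefixes s)

-- ===== LEMMAS AND PROOFS =====

-- first-occurrence 0/1 marks, as B's first pass produces them
def pvMarksF (seen : PySem.Set Char) : List Char → List Int
  | [] => []
  | ch :: t => (if seen.contains ch then 0 else 1) :: pvMarksF (seen.add ch) t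

-- running sums, as B's second pass produces them
def pvSumsF (t : Int) : List Int → List Int
  | [] => []
  | m :: ms => (t + m) :: pvSumsF (t + m) ms

-- the tally of B's final pass, index starting at n
def pvCnt (n : Int) : List Int → Int
  | [] => 0
  | d :: ds => (if d == (n + 1) % 3 then 1 else 0) + pvCnt (n + 1) ds

-- A's loop, with the prefix replaced by its length
def pvAloop (uq : PySem.Set Char) (ans : Int) (n : Nat) : List Char → Int
  | [] => ans
  | ch :: t =>
    let uq' := uq.add ch
    pvAloop uq' (if uq'.length == (n + 1) % 3 then ans + 1 else ans) (n + 1) t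

theorem pvAfold (l : List Char) : ∀ (uq : PySem.Set Char) (ans : Int) (pre : List Char),
    (l.foldl
      (fun (st : PySem.Set Char × Int × List Char) ch =>
        let pre := st.2.2 ++ [ch]
        let uq := st.1.add ch
        let ans := if uq.length == pre.length % 3 then st.2.1 + 1 else st.2.1
        (uq, ans, pre))
      (uq, ans, pre)).2.1 = pvAloop uq ans pre.length l := by
  induction l with
  | nil => intro uq ans pre; simp [pvAloop]
  | cons ch t ih =>
    intro uq ans pre
    rw [List.foldl_cons]
    refine (ih (uq.add ch) _ (pre ++ [ch])).trans ?_
    simp [pvAloop]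

theorem pvMfold (l : List Char) : ∀ (seen : PySem.Set Char) (acc : List Int),
    (l.foldl
      (fun (st : PySem.Set Char × List Int) ch =>
        (st.1.add ch, st.2 ++ [if st.1.contains ch then (0 : Int) else 1]))
      (seen, acc)).2 = acc ++ pvMarksF seen l := by
  induction l with
  | nil => intro seen acc; simp [pvMarksF]
  | cons ch t ih =>
    intro seen acc
    rw [List.foldl_cons]
    refine (ih (seen.add ch) (acc ++ [if seen.contains ch then (0 : Int) else 1])).trans ?_
    simp [pvMarksF]

theorem pvSfold (ms : List Int) : ∀ (t : Int) (acc : List Int),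
    (ms.foldl
      (fun (st : Int × List Int) m => (st.1 + m, st.2 ++ [st.1 + m]))
      (t, acc)).2 = acc ++ pvSumsF t ms := by
  induction ms with
  | nil => intro t acc; simp [pvSumsF]
  | cons m rest ih =>
    intro t acc
    rw [List.foldl_cons]
    refine (ih (t + m) (acc ++ [t + m])).trans ?_
    simp [pvSumsF]

theorem pvCfold (ds : List Int) : ∀ (n : Int),
    (((PySem.List.enumerate ds n).filter (fun p => p.2 == (p.1 + 1) % 3)).length : Int)
      = pvCnt n ds := by
  induction ds with
  | nil => intro n; simp [PySem.List.enumerate, pvCnt]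
  | cons d rest ih =>
    intro n
    simp only [PySem.List.enumerate_cons, List.filter_cons, pvCnt]
    by_cases h : d = (n + 1) % 3 <;> simp [h, ih, Int.add_comm]

theorem pvSetAddLen (uq : PySem.Set Char) (ch : Char) :
    ((PySem.Set.add uq ch).length : Int)
      = (uq.length : Int) + (if uq.contains ch then 0 else 1) := by
  by_cases h : ch ∈ uq <;> simp [PySem.Set.add, h]

theorem pvMain (l : List Char) : ∀ (uq : PySem.Set Char) (ans : Int) (n : Nat),
    pvAloop uq ans n l = ans + pvCnt (n : Int) (pvSumsF (uq.length : Int) (pvMarksF uq l)) := by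
  induction l with
  | nil => intro uq ans n; simp [pvAloop, pvMarksF, pvSumsF, pvCnt]
  | cons ch t ih =>
    intro uq ans n
    simp only [pvAloop, pvMarksF, pvSumsF, pvCnt]
    rw [ih]
    have hlen : (uq.length : Int) + (if uq.contains ch then (0 : Int) else 1)
        = ((PySem.Set.add uq ch).length : Int) := (pvSetAddLen uq ch).symm
    rw [hlen]
    have hmod : (((n + 1) % 3 : Nat) : Int) = ((n : Int) + 1) % 3 := by
      push_cast; ring_nf
    have hcond : ((PySem.Set.add uq ch).length == (n + 1) % 3)
        = (((PySem.Set.add uq ch).length : Int) == ((n : Int) + 1) % 3) := by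
      rw [← hmod]; simp
      constructor <;> intro h <;> exact_mod_cast h
    rw [hcond]
    push_cast
    by_cases h : (((PySem.Set.add uq ch).length : Int) = ((n : Int) + 1) % 3) <;>
      simp [h] <;> ring

-- ===== VERDICT (by name: the statement is the Claim_ definition above) =====
theorem residuePrefixes_spec : Claim_equal_residuePrefixes := by
  intro s _
  unfold Spec_residuePrefixes residuePrefixes residuePrefixes_alt
  simp only [pvAfold, pvMfold, pvSfold, pvCfold, pvMain, List.length_nil, List.nil_append]
  simp [PySem.Set.empty]
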